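-- pv_equiv track=rewrite | github.com/QuentinAndre11/D10-WoD-Probabilities | rolls.py | countSuccess
-- ===== SOURCE A (Python) =====
-- def countSuccess(L, diff, hero) :
--
--     """
--     Counts the number of success for the roll.
--
--     Parameters
--     ----------
--     L: int list
--         Decreasing sorted list with values between 1 and 10.
--     diff : int
--         Difficulty of the roll. A dice is counted as a success if the value of the dice is greater or equal to the difficulty.
--     hero : optional bool
--         If the character is a hero, its 10 count two success instead of one, but are cancelled first by a critical failure (a one on another dice).
--     """
--
--     success = 0
--     for val in L :
--         if val == 1 :
--             success -= 1
--         elif val == 10 :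
--             if hero :
--                 success += 2
--             else :
--                 success += 1
--         elif val >= diff :
--             success += 1
--     return success
-- ===== SOURCE B (Python) =====
-- def countSuccess(L, diff, hero):
--     # Aggregate counts once, then combine arithmetically.
--     tens = L.count(10)
--     ones = L.count(1)
--     others = sum(1 for v in L if v != 1 and v != 10 and v >= diff)
--     return (2 if hero else 1) * tens + others - ones
-- ===== Notes on version B (the rewrite author's own statement) =====
-- stated objective: alternative
-- what changed: Replaced A's single branching accumulator loop with aggregate counts (count of 10s, count of 1s, count of remaining dice meeting the difficulty) combined by one arithmetic formula.
import Mathlib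
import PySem

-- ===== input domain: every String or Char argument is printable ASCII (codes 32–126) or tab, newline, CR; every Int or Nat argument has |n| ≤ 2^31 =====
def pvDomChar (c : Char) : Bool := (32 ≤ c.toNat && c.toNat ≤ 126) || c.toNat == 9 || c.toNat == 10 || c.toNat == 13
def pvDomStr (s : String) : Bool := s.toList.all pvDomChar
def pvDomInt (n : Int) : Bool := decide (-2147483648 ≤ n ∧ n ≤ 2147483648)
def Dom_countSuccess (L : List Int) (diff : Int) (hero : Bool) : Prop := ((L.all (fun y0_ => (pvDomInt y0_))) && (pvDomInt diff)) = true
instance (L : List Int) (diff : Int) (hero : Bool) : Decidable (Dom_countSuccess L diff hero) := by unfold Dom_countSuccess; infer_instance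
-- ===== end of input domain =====

-- B replaces A's single branching accumulator loop by aggregate counts (count of 10s,
-- count of 1s, count of other dice meeting the difficulty) combined arithmetically;
-- objective: alternative decomposition, same O(n) cost.

-- ===== PORT A =====
def countSuccess (L : List Int) (diff : Int) (hero : Bool) : Int :=
  L.foldl (fun success val =>
    if val == 1 then success - 1
    else if val == 10 then (if hero then success + 2 else success + 1)
    else if val ≥ diff then success + 1
    else success) 0

-- ===== PORT B =====
def countSuccess_alt (L : List Int) (diff : Int) (hero : Bool) : Int :=
  let tens := PySem.List.count L 10
  let ones := PySem.List.count L 1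
  let others : Int := L.countP (fun v => v ≠ 1 && v ≠ 10 && v ≥ diff)
  (if hero then 2 else 1) * tens + others - ones

-- ===== PRECONDITION & SPEC =====
def Spec_countSuccess (L : List Int) (diff : Int) (hero : Bool) (out : Int) : Prop := out = countSuccess_alt L diff hero
instance (L : List Int) (diff : Int) (hero : Bool) (out : Int) : Decidable (Spec_countSuccess L diff hero out) := by unfold Spec_countSuccess; infer_instance

-- ===== CLAIM (what is proved, stated in full; the proofs are below) =====
def Claim_equal_countSuccess : Prop := ∀ (L : List Int) (diff : Int) (hero : Bool), Dom_countSuccess L diff hero → Spec_countSuccess L diff hero (countSuccess L diff hero)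

-- ===== LEMMAS AND PROOFS =====

theorem countSuccess_foldl_shift (L : List Int) (diff : Int) (hero : Bool) (s : Int) :
    L.foldl (fun success val =>
      if val == 1 then success - 1
      else if val == 10 then (if hero then success + 2 else success + 1)
      else if val ≥ diff then success + 1
      else success) s = s + countSuccess_alt L diff hero := by
  induction L generalizing s with
  | nil => simp [countSuccess_alt, PySem.List.count]
  | cons v L ih =>
    simp only [List.foldl_cons, ih]
    simp only [countSuccess_alt, PySem.List.count_eq, List.count_cons, List.countP_cons]
    cases hero <;> split_ifs <;> simp_all <;> omega

-- ===== VERDICT (by name: the statement is the Claim_ definition above) =====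
theorem countSuccess_spec : Claim_equal_countSuccess := by
  intro L diff hero _
  unfold Spec_countSuccess countSuccess
  rw [countSuccess_foldl_shift]
  omega
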